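-- pv_equiv track=rewrite | github.com/dsychoi/aoc2023 | day14/day14.py | run_cycles
-- ===== SOURCE A (Python) =====
-- def tilt_north(platform):
--     rows, cols = len(platform), len(platform[0])
--     new_platform = [['.' for _ in range(cols)] for _ in range(rows)]
--
--     for j in range(cols):
--         insert_position = 0
--         for i in range(rows):
--             if platform[i][j] == '#':
--                 new_platform[i][j] = '#'
--                 insert_position = max(insert_position, i + 1)
--             elif platform[i][j] == 'O':
--                 new_platform[insert_position][j] = 'O'
--                 insert_position += 1
--
--     return new_platform
--
-- def calculate_load(platform):
--     rows = len(platform)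
--     total_load = 0
--     for i in range(rows):
--         total_load += platform[i].count('O') * (rows - i)
--     return total_load
--
-- def tilt_south(platform):
--     rows, cols = len(platform), len(platform[0])
--     new_platform = [['.' for _ in range(cols)] for _ in range(rows)]
--
--     for j in range(cols):
--         insert_position = rows - 1
--         for i in reversed(range(rows)):
--             if platform[i][j] == '#':
--                 new_platform[i][j] = '#'
--                 insert_position = min(insert_position, i - 1)
--             elif platform[i][j] == 'O':
--                 new_platform[insert_position][j] = 'O'
--                 insert_position -= 1
--
--     return new_platform
--
-- def tilt_east(platform):
--     rows, cols = len(platform), len(platform[0])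
--     new_platform = [['.' for _ in range(cols)] for _ in range(rows)]
--
--     for i in range(rows):
--         insert_position = cols - 1
--         for j in reversed(range(cols)):
--             if platform[i][j] == '#':
--                 new_platform[i][j] = '#'
--                 insert_position = min(insert_position, j - 1)
--             elif platform[i][j] == 'O':
--                 new_platform[i][insert_position] = 'O'
--                 insert_position -= 1
--
--     return new_platform
--
-- def tilt_west(platform):
--     rows, cols = len(platform), len(platform[0])
--     new_platform = [['.' for _ in range(cols)] for _ in range(rows)]
--
--     for i in range(rows):
--         insert_position = 0
--         for j in range(cols):
--             if platform[i][j] == '#':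
--                 new_platform[i][j] = '#'
--                 insert_position = max(insert_position, j + 1)
--             elif platform[i][j] == 'O':
--                 new_platform[i][insert_position] = 'O'
--                 insert_position += 1
--
--     return new_platform
--
-- def run_cycles(platform, cycles):
--     states = []
--     for cycle in range(cycles):
--         for tilt in [tilt_north, tilt_west, tilt_south, tilt_east]:
--             platform = tilt(platform)
--         if platform in states:
--             index = states.index(platform)
--             cycle_length = len(states) - index
--             remaining_cycles = (cycles - cycle) % cycle_length
--             if remaining_cycles == 0:
--                 return calculate_load(states[index])
--             else:
--                 return calculate_load(states[index + remaining_cycles - 1])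
--         states.append(platform)
--     return calculate_load(platform)
-- ===== SOURCE B (Python) =====
-- # B: spin = rotation-free transpose/reverse conjugations of ONE segment-counting row
-- # roll (no per-direction insert-pointer grids), and the driver keeps only a state->spin-count
-- # dict and RECOMPUTES the target state by replaying spins from the original platform instead
-- # of storing and indexing the list of intermediate states. Objective: alternative structure.
--
-- def _roll(row):
--     # compact a line leftwards: within each '#'-delimited segment, all 'O's first, then '.'s
--     out, cnt, seg = [], 0, 0
--     for c in row:
--         if c == '#':
--             out += ['O'] * cnt + ['.'] * (seg - cnt) + ['#']
--             cnt = 0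
--             seg = 0
--         else:
--             seg += 1
--             if c == 'O':
--                 cnt += 1
--     out += ['O'] * cnt + ['.'] * (seg - cnt)
--     return out
--
-- def _cols(g):
--     return [list(t) for t in zip(*g)]
--
-- def _rev_roll(row):
--     return list(reversed(_roll(list(reversed(row)))))
--
-- def _spin(p):
--     cols = len(p[0]) if p else 0
--     g = [row[:cols] for row in p]
--     g = _cols([_roll(c) for c in _cols(g)])          # tilt north
--     g = [_roll(r) for r in g]                        # tilt west
--     g = _cols([_rev_roll(c) for c in _cols(g)])      # tilt south
--     g = [_rev_roll(r) for r in g]                    # tilt east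
--     return g
--
-- def calculate_load(platform):
--     rows = len(platform)
--     total_load = 0
--     for i in range(rows):
--         total_load += platform[i].count('O') * (rows - i)
--     return total_load
--
-- def run_cycles(platform, cycles):
--     original = platform
--     seen = {}
--     t = 0
--     while t < cycles:
--         platform = _spin(platform)
--         t += 1
--         key = tuple(map(tuple, platform))
--         first = seen.get(key)
--         if first is not None:
--             period = t - first
--             r = (cycles - first + 1) % period
--             e = first if r == 0 else first + r - 1
--             g = original
--             for _ in range(e):
--                 g = _spin(g)
--             return calculate_load(g)
--         seen[key] = t
--     return calculate_load(platform)
-- ===== Notes on version B (the rewrite author's own statement) =====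
-- stated objective: alternative
-- what changed: B simulates a spin by transpose/reverse conjugations of one segment-counting row-roll pass (instead of A's four separate insert-pointer scans writing into a preallocated grid), and its driver keeps only a dict from state to spin count and recomputes the answer state by replaying spins from the original platform (instead of A's list of all states scanned with `in`/`.index` and indexed for the result).
import Mathlib
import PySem

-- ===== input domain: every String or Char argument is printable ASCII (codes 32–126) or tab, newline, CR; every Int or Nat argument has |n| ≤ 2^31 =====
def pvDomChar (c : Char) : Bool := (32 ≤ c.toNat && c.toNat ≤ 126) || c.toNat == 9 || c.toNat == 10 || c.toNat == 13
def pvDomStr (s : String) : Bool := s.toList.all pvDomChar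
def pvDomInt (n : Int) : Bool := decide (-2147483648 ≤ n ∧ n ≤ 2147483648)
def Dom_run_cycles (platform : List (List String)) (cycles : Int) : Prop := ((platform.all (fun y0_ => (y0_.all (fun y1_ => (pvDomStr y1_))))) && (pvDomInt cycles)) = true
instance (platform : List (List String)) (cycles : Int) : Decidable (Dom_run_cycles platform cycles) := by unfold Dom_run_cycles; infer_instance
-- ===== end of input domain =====

-- B replaces A's four insert-pointer tilt passes by transpose/reverse conjugations of one
-- segment-counting row roll, and its driver keeps only a state -> spin-count dict and
-- replays spins from the original platform instead of storing/indexing all states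
-- (objective: alternative structure, same exact return value).

-- ===== PORT A =====

-- new_platform[i][j] = v  (writes are always in range when reached under Pre_)
def pvSet2 (m : List (List String)) (i j : Nat) (v : String) : List (List String) :=
  m.set i ((m.getD i []).set j v)

-- [['.' for _ in range(cols)] for _ in range(rows)]
def pvDots (rows cols : Nat) : List (List String) :=
  (List.range rows).map (fun _ => (List.range cols).map (fun _ => "."))

-- loop bodies of the four tilt scans, factored out (c is the cell just read)
def nStep (j : Nat) (s : List (List String) × Nat) (i : Nat) (c : String) :
    List (List String) × Nat :=
  if c = "#" then (pvSet2 s.1 i j "#", max s.2 (i + 1))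
  else if c = "O" then (pvSet2 s.1 s.2 j "O", s.2 + 1)
  else s

def wStep (i : Nat) (s : List (List String) × Nat) (j : Nat) (c : String) :
    List (List String) × Nat :=
  if c = "#" then (pvSet2 s.1 i j "#", max s.2 (j + 1))
  else if c = "O" then (pvSet2 s.1 i s.2 "O", s.2 + 1)
  else s

-- insert_position may end below 0, but the 'O'-branch write only happens at a
-- nonnegative position (scan invariant), so `.toNat` is exact here.
def sStep (j : Nat) (s : List (List String) × Int) (i : Int) (c : String) :
    List (List String) × Int :=
  if c = "#" then (pvSet2 s.1 i.toNat j "#", min s.2 (i - 1))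
  else if c = "O" then (pvSet2 s.1 s.2.toNat j "O", s.2 - 1)
  else s

def eStep (i : Nat) (s : List (List String) × Int) (j : Int) (c : String) :
    List (List String) × Int :=
  if c = "#" then (pvSet2 s.1 i j.toNat "#", min s.2 (j - 1))
  else if c = "O" then (pvSet2 s.1 i s.2.toNat "O", s.2 - 1)
  else s

def tiltNorth (p : List (List String)) : List (List String) :=
  let rows := p.length
  let cols := (p.getD 0 []).length
  (List.range cols).foldl (fun np j =>
    ((List.range rows).foldl
      (fun s i => nStep j s i ((p.getD i []).getD j "")) (np, 0)).1) (pvDots rows cols)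

def tiltSouth (p : List (List String)) : List (List String) :=
  let rows := p.length
  let cols := (p.getD 0 []).length
  (List.range cols).foldl (fun np j =>
    ((List.range rows).reverse.foldl
      (fun s i => sStep j s (Int.ofNat i) ((p.getD i []).getD j "")) (np, (rows : Int) - 1)).1)
    (pvDots rows cols)

def tiltEast (p : List (List String)) : List (List String) :=
  let rows := p.length
  let cols := (p.getD 0 []).length
  (List.range rows).foldl (fun np i =>
    ((List.range cols).reverse.foldl
      (fun s j => eStep i s (Int.ofNat j) ((p.getD i []).getD j "")) (np, (cols : Int) - 1)).1)
    (pvDots rows cols)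

def tiltWest (p : List (List String)) : List (List String) :=
  let rows := p.length
  let cols := (p.getD 0 []).length
  (List.range rows).foldl (fun np i =>
    ((List.range cols).foldl
      (fun s j => wStep i s j ((p.getD i []).getD j "")) (np, 0)).1) (pvDots rows cols)

-- calculate_load (identical helper in both sources, shared)
def calcLoad (p : List (List String)) : Int :=
  let rows := p.length
  (List.range rows).foldl
    (fun acc i => acc + ((p.getD i []).count "O" : Int) * ((rows : Int) - (i : Int))) 0

-- the `for cycle in range(cycles)` loop with early return, as recursion on the number of
-- remaining iterations with the running loop variable `cycle` (same loop state)
def runCyclesA : Nat → Int → List (List (List String)) → List (List String) → Int → Int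
  | 0, _, _, p, _ => calcLoad p
  | Nat.succ fuel, cycle, states, p, cycles =>
    let p := [tiltNorth, tiltWest, tiltSouth, tiltEast].foldl (fun q f => f q) p
    if p ∈ states then
      let index := (PySem.List.index? states p).getD 0
      let cycleLength := (states.length : Int) - (index : Int)
      let remaining := PySem.Int.mod (cycles - cycle) cycleLength
      if remaining = 0 then calcLoad (PySem.List.pyGetD states (index : Int) [])
      else calcLoad (PySem.List.pyGetD states ((index : Int) + remaining - 1) [])
    else runCyclesA fuel (cycle + 1) (states ++ [p]) p cycles

def run_cycles (platform : List (List String)) (cycles : Int) : Int :=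
  runCyclesA cycles.toNat 0 [] platform cycles

-- ===== PORT B =====

-- _roll's loop body: state (out, cnt, seg), flush a segment at each '#'
def rollStep (st : List String × Nat × Nat) (c : String) : List String × Nat × Nat :=
  if c = "#" then
    (st.1 ++ List.replicate st.2.1 "O" ++ List.replicate (st.2.2 - st.2.1) "." ++ ["#"], 0, 0)
  else (st.1, (if c = "O" then st.2.1 + 1 else st.2.1), st.2.2 + 1)

def rollB (row : List String) : List String :=
  let s := row.foldl rollStep ([], 0, 0)
  s.1 ++ List.replicate s.2.1 "O" ++ List.replicate (s.2.2 - s.2.1) "."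

-- zip(*g): transpose truncating to the shortest row
def minWidth : List (List String) → Nat
  | [] => 0
  | [r] => r.length
  | r :: rs => min r.length (minWidth rs)

def colsB (g : List (List String)) : List (List String) :=
  match g with
  | [] => []
  | _ => (List.range (minWidth g)).map (fun j => g.map (fun r => r.getD j ""))

def revRollB (row : List String) : List String :=
  (rollB row.reverse).reverse

def spinB (p : List (List String)) : List (List String) :=
  let cols := if p = [] then 0 else (p.headD []).length
  let g1 := p.map (fun row => row.take cols)
  let g2 := colsB ((colsB g1).map rollB)
  let g3 := g2.map rollB
  let g4 := colsB ((colsB g3).map revRollB)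
  g4.map revRollB

-- for _ in range(e): g = _spin(g)
def replayB : Nat → List (List String) → List (List String)
  | 0, g => g
  | Nat.succ n, g => replayB n (spinB g)

-- the `while t < cycles` loop; fuel = (cycles - t), dict maps state -> spin count
def runCyclesB : Nat → Int → Int → PySem.Dict (List (List String)) Int →
    List (List String) → List (List String) → Int
  | 0, _, _, _, _, p => calcLoad p
  | Nat.succ fuel, cycles, t, seen, orig, p =>
    let p' := spinB p
    let t' := t + 1
    (seen.get? p').elim
      (runCyclesB fuel cycles t' (seen.insert p' t') orig p')
      (fun first =>
        let period := t' - first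
        let r := PySem.Int.mod (cycles - first + 1) period
        let e := if r = 0 then first else first + r - 1
        calcLoad (replayB e.toNat orig))

def run_cycles_alt (platform : List (List String)) (cycles : Int) : Int :=
  runCyclesB cycles.toNat cycles 0 PySem.Dict.empty platform platform

-- ===== PRECONDITION & SPEC =====
-- Pre_ excludes exactly the inputs on which the Python A raises IndexError: when at least one
-- spin cycle runs, the platform must be non-empty and every row at least as long as row 0.
def Pre_run_cycles (platform : List (List String)) (cycles : Int) : Prop :=
  0 < cycles → (platform ≠ [] ∧ ∀ row ∈ platform, (platform.headD []).length ≤ row.length)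
instance (platform : List (List String)) (cycles : Int) : Decidable (Pre_run_cycles platform cycles) := by unfold Pre_run_cycles; infer_instance

def pvWitness_run_cycles : List (List String) × Int := ([[".", "O", "#"], ["O", ".", "O"]], 5)

def Spec_run_cycles (platform : List (List String)) (cycles : Int) (out : Int) : Prop := out = run_cycles_alt platform cycles
instance (platform : List (List String)) (cycles : Int) (out : Int) : Decidable (Spec_run_cycles platform cycles out) := by unfold Spec_run_cycles; infer_instance

-- ===== CLAIM (what is proved, stated in full; the proofs are below) =====
def Claim_equal_run_cycles : Prop := ∀ (platform : List (List String)) (cycles : Int), Dom_run_cycles platform cycles → Pre_run_cycles platform cycles → Spec_run_cycles platform cycles (run_cycles platform cycles)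

-- ===== LEMMAS AND PROOFS =====

-- proof-side infrastructure
def pvRect (g : List (List String)) (rows cols : Nat) : Prop :=
  g.length = rows ∧ ∀ r ∈ g, r.length = cols

def pvColAt (g : List (List String)) (j : Nat) : List String :=
  g.map (fun r => r.getD j "")

def pvUpdCol (g : List (List String)) (j : Nat) (c : List String) : List (List String) :=
  (List.range g.length).map (fun i => (g.getD i []).set j (c.getD i ""))

def pvIdxF {β : Type} (f : β → Nat → String → β) : Nat → List String → β → β
  | _, [], s => s
  | j, c :: cs, s => pvIdxF f (j + 1) cs (f s j c)

def pvIdxD {β : Type} (f : β → Int → String → β) : Int → List String → β → β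
  | _, [], s => s
  | j, c :: cs, s => pvIdxD f (j - 1) cs (f s j c)

def wRow (s : List String × Nat) (j : Nat) (c : String) : List String × Nat :=
  if c = "#" then (s.1.set j "#", max s.2 (j + 1))
  else if c = "O" then (s.1.set s.2 "O", s.2 + 1) else s

def eRow (s : List String × Int) (j : Int) (c : String) : List String × Int :=
  if c = "#" then (s.1.set j.toNat "#", min s.2 (j - 1))
  else if c = "O" then (s.1.set s.2.toNat "O", s.2 - 1) else s

def rollFin (st : List String × Nat × Nat) : List String :=
  st.1 ++ List.replicate st.2.1 "O" ++ List.replicate (st.2.2 - st.2.1) "."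

-- basic getD facts (for rows and for grids)
lemma pv_getD_set_self {α : Type} (d : α) (l : List α) (n : Nat) (v : α) (h : n < l.length) :
    (l.set n v).getD n d = v := by
  simp [List.getD, List.getElem?_set_self, h]

lemma pv_getD_set_ne {α : Type} (d : α) (l : List α) (m n : Nat) (v : α) (h : m ≠ n) :
    (l.set n v).getD m d = l.getD m d := by
  simp [List.getD, List.getElem?_set_ne (by omega : n ≠ m)]

lemma pv_set_getD_self {α : Type} (d : α) (l : List α) (n : Nat) :
    l.set n (l.getD n d) = l := by
  by_cases h : n < l.length
  · simp [List.getD, List.getElem?_eq_getElem h]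
  · rw [List.set_eq_of_length_le (by omega)]

lemma pv_getD_map_range {α : Type} (d : α) (f : Nat → α) (n k : Nat) (h : k < n) :
    (((List.range n).map f).getD k d) = f k := by
  simp [List.getD, List.getElem?_eq_getElem, h]

lemma pv_getD_of_le {α : Type} (d : α) (l : List α) (n : Nat) (h : l.length ≤ n) :
    l.getD n d = d := by
  simp [List.getD, List.getElem?_eq_none_iff.mpr h]

-- pvColAt basics
lemma pv_length_colAt (g : List (List String)) (j : Nat) : (pvColAt g j).length = g.length := by
  simp [pvColAt]

lemma pv_getD_colAt (g : List (List String)) (j i : Nat) :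
    (pvColAt g j).getD i "" = (g.getD i []).getD j "" := by
  by_cases h : i < g.length
  · simp [pvColAt, List.getD, List.getElem?_eq_getElem, h]
  · rw [pv_getD_of_le _ _ _ (by simpa [pvColAt] using (by omega : g.length ≤ i)),
        pv_getD_of_le _ g i (by omega)]
    simp

-- pvSet2 localization
lemma pv_pvSet2_set (g : List (List String)) (i j : Nat) (r : List String) (v : String) :
    pvSet2 (g.set i r) i j v = g.set i (r.set j v) := by
  by_cases h : i < g.length
  · unfold pvSet2
    rw [pv_getD_set_self [] g i r h, List.set_set]
  · rw [List.set_eq_of_length_le (l := g) (by omega), List.set_eq_of_length_le (l := g) (by omega)]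
    unfold pvSet2
    rw [List.set_eq_of_length_le (by omega)]

lemma pv_length_updCol (g : List (List String)) (j : Nat) (c : List String) :
    (pvUpdCol g j c).length = g.length := by
  simp [pvUpdCol]

lemma pv_pvSet2_updCol (g : List (List String)) (j : Nat) (c : List String) (i : Nat)
    (v : String) (hc : c.length = g.length) :
    pvSet2 (pvUpdCol g j c) i j v = pvUpdCol g j (c.set i v) := by
  by_cases h : i < g.length
  · have hU : (pvUpdCol g j c).getD i [] = (g.getD i []).set j (c.getD i "") :=
      pv_getD_map_range _ _ _ _ h
    unfold pvSet2
    rw [hU, List.set_set]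
    apply List.ext_getElem (by simp [pvUpdCol])
    intro k hk hk'
    have hkg : k < g.length := by simpa [pvUpdCol] using hk'
    by_cases hki : k = i
    · subst hki
      rw [List.getElem_set_self]
      simp only [pvUpdCol, List.getElem_map, List.getElem_range]
      rw [pv_getD_set_self _ _ _ _ (by omega)]
    · rw [List.getElem_set_ne (by omega)]
      simp only [pvUpdCol, List.getElem_map, List.getElem_range]
      rw [pv_getD_set_ne _ _ _ _ _ (by omega)]
  · rw [List.set_eq_of_length_le (l := c) (by omega)]
    unfold pvSet2
    rw [List.set_eq_of_length_le (by rw [pv_length_updCol]; omega)]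
-- converting an index fold over range' reading getD into a structural fold over the cells
lemma pv_bridge_fwd {β : Type} (f : β → Nat → String → β) (r : List String) :
    ∀ (k j0 : Nat) (init : β), j0 + k ≤ r.length →
      (List.range' j0 k).foldl (fun s j => f s j (r.getD j "")) init
        = pvIdxF f j0 ((r.drop j0).take k) init := by
  intro k
  induction k with
  | zero => intro j0 init _; simp [pvIdxF]
  | succ n ih =>
    intro j0 init h
    have hj0 : j0 < r.length := by omega
    rw [List.range'_succ, List.foldl_cons, List.drop_eq_getElem_cons hj0]
    rw [List.take_succ_cons]
    show _ = pvIdxF f (j0 + 1) _ (f init j0 r[j0])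
    rw [← ih (j0 + 1) (f init j0 r[j0]) (by omega)]
    congr 2
    simp [List.getD, List.getElem?_eq_getElem hj0]

lemma pv_bridge_rev {β : Type} (f : β → Int → String → β) (r : List String) :
    ∀ (m : Nat) (init : β), m ≤ r.length →
      ((List.range m).reverse).foldl (fun s j => f s (Int.ofNat j) (r.getD j "")) init
        = pvIdxD f ((m : Int) - 1) ((r.take m).reverse) init := by
  intro m
  induction m with
  | zero => intro init _; simp [pvIdxD]
  | succ n ih =>
    intro init h
    have hn : n < r.length := by omega
    have hread : r.getD n "" = r[n] := by simp [List.getD, List.getElem?_eq_getElem hn]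
    have e1 : ((n + 1 : Nat) : Int) - 1 = (n : Int) := by push_cast; ring
    rw [List.range_succ, List.reverse_append, List.reverse_singleton, List.singleton_append,
        List.foldl_cons, List.take_succ, List.getElem?_eq_getElem hn]
    simp only [Option.toList_some, List.reverse_append, List.reverse_singleton,
      List.singleton_append]
    rw [e1, pvIdxD, ih (f init (Int.ofNat n) (r.getD n "")) (by omega)]
    congr 1
    simp [List.getElem?_eq_getElem hn]

-- measure invariant of the roll fold
lemma pv_rollStep_meas (suf : List String) : ∀ (out : List String) (cnt seg : Nat), cnt ≤ seg →
    (suf.foldl rollStep (out, cnt, seg)).2.1 ≤ (suf.foldl rollStep (out, cnt, seg)).2.2 ∧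
    (suf.foldl rollStep (out, cnt, seg)).1.length + (suf.foldl rollStep (out, cnt, seg)).2.2
      = out.length + seg + suf.length := by
  induction suf with
  | nil => intro out cnt seg h; simpa using by omega
  | cons c cs ih =>
    intro out cnt seg h
    rw [List.foldl_cons]
    by_cases hc : c = "#"
    · rw [show rollStep (out, cnt, seg) c
            = (out ++ List.replicate cnt "O" ++ List.replicate (seg - cnt) "." ++ ["#"], 0, 0) by
          simp [rollStep, hc]]
      have := ih (out ++ List.replicate cnt "O" ++ List.replicate (seg - cnt) "." ++ ["#"]) 0 0
        (le_refl 0)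
      rcases this with ⟨h1, h2⟩
      refine ⟨h1, ?_⟩
      rw [h2]; simp [List.length_append]; omega
    · rw [show rollStep (out, cnt, seg) c
            = (out, (if c = "O" then cnt + 1 else cnt), seg + 1) by simp [rollStep, hc]]
      by_cases ho : c = "O"
      · simp only [if_pos ho]
        have := ih out (cnt + 1) (seg + 1) (by omega)
        rcases this with ⟨h1, h2⟩
        exact ⟨h1, by rw [h2]; simp; omega⟩
      · simp only [if_neg ho]
        have := ih out cnt (seg + 1) (by omega)
        rcases this with ⟨h1, h2⟩
        exact ⟨h1, by rw [h2]; simp; omega⟩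

lemma pv_rollB_length (r : List String) : (rollB r).length = r.length := by
  have := pv_rollStep_meas r [] 0 0 (le_refl 0)
  rcases this with ⟨h1, h2⟩
  show (rollFin (r.foldl rollStep ([], 0, 0))).length = r.length
  simp only [rollFin, List.length_append, List.length_replicate]
  simp at h2
  omega

lemma pv_revRollB_length (r : List String) : (revRollB r).length = r.length := by
  simp [revRollB, pv_rollB_length]
-- the west scan on a dotted buffer computes exactly B's roll (state invariant)
lemma pv_wRow_core (suf : List String) :
    ∀ (out : List String) (cnt k : Nat),
      pvIdxF wRow (out.length + (cnt + k)) suf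
          (rollFin (out, cnt, cnt + k) ++ List.replicate suf.length ".", out.length + cnt)
        = (rollFin (suf.foldl rollStep (out, cnt, cnt + k)),
           (suf.foldl rollStep (out, cnt, cnt + k)).1.length
             + (suf.foldl rollStep (out, cnt, cnt + k)).2.1) := by
  induction suf with
  | nil => intro out cnt k; simp [pvIdxF, rollFin]
  | cons c cs ih =>
    intro out cnt k
    rw [pvIdxF, List.foldl_cons]
    by_cases hc : c = "#"
    · have hstep : rollStep (out, cnt, cnt + k) c
          = (out ++ List.replicate cnt "O" ++ List.replicate k "." ++ ["#"], 0, 0) := by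
        simp [rollStep, hc]
      have hbuf : rollFin (out, cnt, cnt + k) ++ List.replicate (c :: cs).length "."
          = (out ++ List.replicate cnt "O" ++ List.replicate k ".")
            ++ ("." :: List.replicate cs.length ".") := by
        simp [rollFin, List.replicate_succ, List.append_assoc]
      have hw : wRow (rollFin (out, cnt, cnt + k) ++ List.replicate (c :: cs).length ".",
            out.length + cnt) (out.length + (cnt + k)) c
          = ((out ++ List.replicate cnt "O" ++ List.replicate k "." ++ ["#"])
              ++ List.replicate cs.length ".", out.length + (cnt + k) + 1) := by
        simp only [wRow, if_pos hc, Prod.mk.injEq]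
        refine ⟨?_, by omega⟩
        rw [hbuf, List.set_append_right _ _ (by simp)]
        simp [List.append_assoc]
      rw [hw, hstep]
      have hthis := ih (out ++ List.replicate cnt "O" ++ List.replicate k "." ++ ["#"]) 0 0
      have hfin : rollFin (out ++ List.replicate cnt "O" ++ List.replicate k "." ++ ["#"], 0, 0)
          = out ++ List.replicate cnt "O" ++ List.replicate k "." ++ ["#"] := by
        simp [rollFin]
      rw [hfin] at hthis
      simp only [Nat.add_zero] at hthis
      rw [show out.length + (cnt + k) + 1
            = (out ++ List.replicate cnt "O" ++ List.replicate k "." ++ ["#"]).length by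
          simp; omega]
      exact hthis
    · by_cases ho : c = "O"
      · have hstep : rollStep (out, cnt, cnt + k) c = (out, cnt + 1, cnt + k + 1) := by
          simp [rollStep, hc, ho]
        have hbuf : rollFin (out, cnt, cnt + k) ++ List.replicate (c :: cs).length "."
            = (out ++ List.replicate cnt "O")
              ++ ("." :: List.replicate (k + cs.length) ".") := by
          simp [rollFin, List.append_assoc, ← List.replicate_succ, ← List.replicate_add] <;> omega
        have hw : wRow (rollFin (out, cnt, cnt + k) ++ List.replicate (c :: cs).length ".",
              out.length + cnt) (out.length + (cnt + k)) c
            = (rollFin (out, cnt + 1, (cnt + 1) + k) ++ List.replicate cs.length ".",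
               out.length + (cnt + 1)) := by
          simp only [wRow, if_pos ho, if_neg hc, Prod.mk.injEq]
          refine ⟨?_, by omega⟩
          rw [hbuf, List.set_append_right _ _ (by simp)]
          simp only [List.length_append, List.length_replicate]
          rw [show out.length + cnt - (out.length + cnt) = 0 by omega, List.set_cons_zero]
          simp only [rollFin]
          rw [show cnt + 1 + k - (cnt + 1) = k from by omega, List.replicate_succ']
          simp [List.append_assoc, ← List.replicate_add]
        rw [hw, hstep]
        have hthis := ih out (cnt + 1) k
        rw [show cnt + k + 1 = cnt + 1 + k by omega,
            show out.length + (cnt + k) + 1 = out.length + (cnt + 1 + k) by omega]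
        exact hthis
      · have hstep : rollStep (out, cnt, cnt + k) c = (out, cnt, cnt + (k + 1)) := by
          simp [rollStep, hc, ho]; omega
        have hw : wRow (rollFin (out, cnt, cnt + k) ++ List.replicate (c :: cs).length ".",
              out.length + cnt) (out.length + (cnt + k)) c
            = (rollFin (out, cnt, cnt + (k + 1)) ++ List.replicate cs.length ".",
               out.length + cnt) := by
          simp only [wRow, if_neg hc, if_neg ho]
          congr 1
          simp only [rollFin]
          rw [show cnt + k - cnt = k from by omega, show cnt + (k + 1) - cnt = k + 1 from by omega,
            List.replicate_succ']
          simp [List.append_assoc, List.replicate_succ, ← List.replicate_add]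
        rw [hw, hstep]
        have hthis := ih out cnt (k + 1)
        rw [show out.length + (cnt + k) + 1 = out.length + (cnt + (k + 1)) by omega]
        exact hthis
lemma pv_dot_comm (a : Nat) (Z : List String) :
    "." :: (List.replicate a "." ++ Z) = List.replicate a "." ++ "." :: Z := by
  rw [← List.cons_append, ← List.replicate_succ, List.replicate_succ', List.append_assoc]
  simp

lemma pv_dots (a b : Nat) (X : List String) :
    List.replicate a "." ++ (List.replicate b "." ++ X) = List.replicate (a + b) "." ++ X := by
  rw [← List.append_assoc, ← List.replicate_add]

-- corollary: the full west scan is B's roll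
lemma pv_wRow_full (r : List String) :
    pvIdxF wRow 0 r (List.replicate r.length ".", 0)
      = (rollB r, (r.foldl rollStep ([], 0, 0)).1.length + (r.foldl rollStep ([], 0, 0)).2.1) := by
  have h := pv_wRow_core r [] 0 0
  simp only [List.length_nil, Nat.zero_add, Nat.add_zero] at h
  rw [show rollFin ([], 0, 0) ++ List.replicate r.length "." = List.replicate r.length "." from by
    simp [rollFin]] at h
  exact h

-- the east scan on a dotted buffer computes exactly B's reversed roll (mirror invariant)
lemma pv_eRow_core (suf : List String) :
    ∀ (out : List String) (cnt k : Nat),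
      pvIdxD eRow ((suf.length : Int) - 1) suf
          (List.replicate suf.length "."
            ++ (List.replicate k "." ++ List.replicate cnt "O" ++ out.reverse),
           ((suf.length : Int) - 1) + (k : Int))
        = ((rollFin (suf.foldl rollStep (out, cnt, cnt + k))).reverse,
           (-1 : Int) + (((suf.foldl rollStep (out, cnt, cnt + k)).2.2 : Int)
             - ((suf.foldl rollStep (out, cnt, cnt + k)).2.1 : Int))) := by
  induction suf with
  | nil =>
    intro out cnt k
    simp only [pvIdxD, List.foldl_nil, List.length_nil, List.replicate_zero, List.nil_append]
    rw [Prod.mk.injEq]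
    refine ⟨?_, by push_cast; ring⟩
    simp only [rollFin, List.reverse_append, List.reverse_replicate]
    rw [show cnt + k - cnt = k from by omega]
    simp [List.append_assoc]
  | cons c cs ih =>
    intro out cnt k
    rw [pvIdxD, List.foldl_cons]
    rw [show ((c :: cs).length : Int) - 1 = (cs.length : Int) from by simp]
    by_cases hc : c = "#"
    · have hstep : rollStep (out, cnt, cnt + k) c
          = (out ++ List.replicate cnt "O" ++ List.replicate k "." ++ ["#"], 0, 0) := by
        simp [rollStep, hc]
      have hw : eRow (List.replicate (c :: cs).length "."
            ++ (List.replicate k "." ++ List.replicate cnt "O" ++ out.reverse),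
            (cs.length : Int) + (k : Int)) (cs.length : Int) c
          = (List.replicate cs.length "."
              ++ (List.replicate 0 "." ++ List.replicate 0 "O"
                  ++ (out ++ List.replicate cnt "O" ++ List.replicate k "." ++ ["#"]).reverse),
             ((cs.length : Int) - 1) + ((0 : Nat) : Int)) := by
        simp only [eRow, if_pos hc, Prod.mk.injEq]
        refine ⟨?_, by rw [min_eq_right (by omega)]; push_cast; ring⟩
        rw [Int.toNat_natCast, List.length_cons, List.replicate_succ', List.append_assoc,
          List.set_append_right _ _ (by simp)]
        simp [List.append_assoc]
      rw [hw, hstep]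
      have hthis := ih (out ++ List.replicate cnt "O" ++ List.replicate k "." ++ ["#"]) 0 0
      simpa using hthis
    · by_cases ho : c = "O"
      · have hstep : rollStep (out, cnt, cnt + k) c = (out, cnt + 1, cnt + k + 1) := by
          simp [rollStep, hc, ho]
        have hw : eRow (List.replicate (c :: cs).length "."
              ++ (List.replicate k "." ++ List.replicate cnt "O" ++ out.reverse),
              (cs.length : Int) + (k : Int)) (cs.length : Int) c
            = (List.replicate cs.length "."
                ++ (List.replicate k "." ++ List.replicate (cnt + 1) "O" ++ out.reverse),
               ((cs.length : Int) - 1) + (k : Int)) := by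
          simp only [eRow, if_pos ho, if_neg hc, Prod.mk.injEq]
          refine ⟨?_, by ring⟩
          rw [show (((cs.length : Int)) + (k : Int)).toNat = cs.length + k from by
            rw [← Nat.cast_add, Int.toNat_natCast]]
          simp only [List.length_cons, List.replicate_succ, List.cons_append, List.append_assoc]
          rw [← List.cons_append, ← List.replicate_succ, pv_dots,
            show cs.length + 1 + k = (cs.length + k) + 1 from by omega, List.replicate_succ',
            List.append_assoc, List.singleton_append,
            List.set_append_right _ _ (by simp), pv_dots]
          simp
        rw [hw, hstep]
        have hthis := ih out (cnt + 1) k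
        rw [show cnt + k + 1 = cnt + 1 + k from by omega]
        exact hthis
      · have hstep : rollStep (out, cnt, cnt + k) c = (out, cnt, cnt + (k + 1)) := by
          simp [rollStep, hc, ho]; omega
        have hw : eRow (List.replicate (c :: cs).length "."
              ++ (List.replicate k "." ++ List.replicate cnt "O" ++ out.reverse),
              (cs.length : Int) + (k : Int)) (cs.length : Int) c
            = (List.replicate cs.length "."
                ++ (List.replicate (k + 1) "." ++ List.replicate cnt "O" ++ out.reverse),
               ((cs.length : Int) - 1) + ((k + 1 : Nat) : Int)) := by
          simp only [eRow, if_neg hc, if_neg ho, Prod.mk.injEq]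
          refine ⟨?_, by push_cast; ring⟩
          simp only [List.length_cons, List.replicate_succ, List.cons_append, List.append_assoc]
          exact pv_dot_comm cs.length _
        rw [hw, hstep]
        exact ih out cnt (k + 1)

-- corollary: the full east scan is B's reversed roll
lemma pv_eRow_full (r : List String) :
    pvIdxD eRow ((r.length : Int) - 1) r.reverse
        (List.replicate r.length ".", ((r.length : Int) - 1))
      = (revRollB r,
         (-1 : Int) + (((r.reverse.foldl rollStep ([], 0, 0)).2.2 : Int)
           - ((r.reverse.foldl rollStep ([], 0, 0)).2.1 : Int))) := by
  have h := pv_eRow_core r.reverse [] 0 0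
  simp only [List.length_reverse, List.reverse_nil, List.replicate_zero, List.nil_append,
    List.append_nil, Nat.cast_zero, Int.add_zero] at h
  exact h
-- simulation: the grid-level scans act on one row / one column only
lemma pv_sim_w (i : Nat) (suf : List String) :
    ∀ (j0 : Nat) (g : List (List String)) (r : List String) (pos : Nat),
      pvIdxF (wStep i) j0 suf (g.set i r, pos)
        = (g.set i ((pvIdxF wRow j0 suf (r, pos)).1), (pvIdxF wRow j0 suf (r, pos)).2) := by
  induction suf with
  | nil => intro j0 g r pos; simp [pvIdxF]
  | cons c cs ih =>
    intro j0 g r pos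
    rw [pvIdxF, pvIdxF]
    by_cases hc : c = "#"
    · rw [show wStep i (g.set i r, pos) j0 c = (g.set i (r.set j0 "#"), max pos (j0 + 1)) from by
          simp only [wStep, if_pos hc]; rw [pv_pvSet2_set],
        show wRow (r, pos) j0 c = (r.set j0 "#", max pos (j0 + 1)) from by simp [wRow, hc]]
      exact ih _ _ _ _
    · by_cases ho : c = "O"
      · rw [show wStep i (g.set i r, pos) j0 c = (g.set i (r.set pos "O"), pos + 1) from by
            simp only [wStep, if_neg hc, if_pos ho]; rw [pv_pvSet2_set],
          show wRow (r, pos) j0 c = (r.set pos "O", pos + 1) from by simp [wRow, hc, ho]]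
        exact ih _ _ _ _
      · rw [show wStep i (g.set i r, pos) j0 c = (g.set i r, pos) from by simp [wStep, hc, ho],
          show wRow (r, pos) j0 c = (r, pos) from by simp [wRow, hc, ho]]
        exact ih _ _ _ _

lemma pv_sim_e (i : Nat) (suf : List String) :
    ∀ (j0 : Int) (g : List (List String)) (r : List String) (pos : Int),
      pvIdxD (eStep i) j0 suf (g.set i r, pos)
        = (g.set i ((pvIdxD eRow j0 suf (r, pos)).1), (pvIdxD eRow j0 suf (r, pos)).2) := by
  induction suf with
  | nil => intro j0 g r pos; simp [pvIdxD]
  | cons c cs ih =>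
    intro j0 g r pos
    rw [pvIdxD, pvIdxD]
    by_cases hc : c = "#"
    · rw [show eStep i (g.set i r, pos) j0 c
            = (g.set i (r.set j0.toNat "#"), min pos (j0 - 1)) from by
          simp only [eStep, if_pos hc]; rw [pv_pvSet2_set],
        show eRow (r, pos) j0 c = (r.set j0.toNat "#", min pos (j0 - 1)) from by simp [eRow, hc]]
      exact ih _ _ _ _
    · by_cases ho : c = "O"
      · rw [show eStep i (g.set i r, pos) j0 c = (g.set i (r.set pos.toNat "O"), pos - 1) from by
            simp only [eStep, if_neg hc, if_pos ho]; rw [pv_pvSet2_set],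
          show eRow (r, pos) j0 c = (r.set pos.toNat "O", pos - 1) from by simp [eRow, hc, ho]]
        exact ih _ _ _ _
      · rw [show eStep i (g.set i r, pos) j0 c = (g.set i r, pos) from by simp [eStep, hc, ho],
          show eRow (r, pos) j0 c = (r, pos) from by simp [eRow, hc, ho]]
        exact ih _ _ _ _

lemma pv_sim_n (j : Nat) (suf : List String) :
    ∀ (i0 : Nat) (g : List (List String)) (c : List String) (pos : Nat),
      c.length = g.length →
      pvIdxF (nStep j) i0 suf (pvUpdCol g j c, pos)
        = (pvUpdCol g j ((pvIdxF wRow i0 suf (c, pos)).1), (pvIdxF wRow i0 suf (c, pos)).2) := by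
  induction suf with
  | nil => intro i0 g c pos _; simp [pvIdxF]
  | cons ch cs ih =>
    intro i0 g c pos hlen
    rw [pvIdxF, pvIdxF]
    by_cases hc : ch = "#"
    · rw [show nStep j (pvUpdCol g j c, pos) i0 ch
            = (pvUpdCol g j (c.set i0 "#"), max pos (i0 + 1)) from by
          simp only [nStep, if_pos hc]; rw [pv_pvSet2_updCol _ _ _ _ _ hlen],
        show wRow (c, pos) i0 ch = (c.set i0 "#", max pos (i0 + 1)) from by simp [wRow, hc]]
      exact ih _ _ _ _ (by simp [hlen])
    · by_cases ho : ch = "O"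
      · rw [show nStep j (pvUpdCol g j c, pos) i0 ch
              = (pvUpdCol g j (c.set pos "O"), pos + 1) from by
            simp only [nStep, if_neg hc, if_pos ho]; rw [pv_pvSet2_updCol _ _ _ _ _ hlen],
          show wRow (c, pos) i0 ch = (c.set pos "O", pos + 1) from by simp [wRow, hc, ho]]
        exact ih _ _ _ _ (by simp [hlen])
      · rw [show nStep j (pvUpdCol g j c, pos) i0 ch = (pvUpdCol g j c, pos) from by
            simp [nStep, hc, ho],
          show wRow (c, pos) i0 ch = (c, pos) from by simp [wRow, hc, ho]]
        exact ih _ _ _ _ hlen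

lemma pv_sim_s (j : Nat) (suf : List String) :
    ∀ (i0 : Int) (g : List (List String)) (c : List String) (pos : Int),
      c.length = g.length →
      pvIdxD (sStep j) i0 suf (pvUpdCol g j c, pos)
        = (pvUpdCol g j ((pvIdxD eRow i0 suf (c, pos)).1), (pvIdxD eRow i0 suf (c, pos)).2) := by
  induction suf with
  | nil => intro i0 g c pos _; simp [pvIdxD]
  | cons ch cs ih =>
    intro i0 g c pos hlen
    rw [pvIdxD, pvIdxD]
    by_cases hc : ch = "#"
    · rw [show sStep j (pvUpdCol g j c, pos) i0 ch
            = (pvUpdCol g j (c.set i0.toNat "#"), min pos (i0 - 1)) from by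
          simp only [sStep, if_pos hc]; rw [pv_pvSet2_updCol _ _ _ _ _ hlen],
        show eRow (c, pos) i0 ch = (c.set i0.toNat "#", min pos (i0 - 1)) from by simp [eRow, hc]]
      exact ih _ _ _ _ (by simp [hlen])
    · by_cases ho : ch = "O"
      · rw [show sStep j (pvUpdCol g j c, pos) i0 ch
              = (pvUpdCol g j (c.set pos.toNat "O"), pos - 1) from by
            simp only [sStep, if_neg hc, if_pos ho]; rw [pv_pvSet2_updCol _ _ _ _ _ hlen],
          show eRow (c, pos) i0 ch = (c.set pos.toNat "O", pos - 1) from by simp [eRow, hc, ho]]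
        exact ih _ _ _ _ (by simp [hlen])
      · rw [show sStep j (pvUpdCol g j c, pos) i0 ch = (pvUpdCol g j c, pos) from by
            simp [sStep, hc, ho],
          show eRow (c, pos) i0 ch = (c, pos) from by simp [eRow, hc, ho]]
        exact ih _ _ _ _ hlen

-- a fold that rewrites each row index once
lemma pv_foldl_set_length (l : List Nat) (v : Nat → List String → List String) :
    ∀ g : List (List String),
      (l.foldl (fun g i => g.set i (v i (g.getD i []))) g).length = g.length := by
  induction l with
  | nil => intro g; rfl
  | cons a t ih => intro g; rw [List.foldl_cons, ih]; simp

lemma pv_foldl_set_getD (l : List Nat) (v : Nat → List String → List String) :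
    ∀ g : List (List String), l.Nodup → (∀ j ∈ l, j < g.length) →
      ∀ i, i < g.length →
        (l.foldl (fun g i => g.set i (v i (g.getD i []))) g).getD i []
          = if i ∈ l then v i (g.getD i []) else g.getD i [] := by
  induction l with
  | nil => intro g _ _ i _; simp
  | cons a t ih =>
    intro g hnd hb i hi
    rw [List.foldl_cons]
    have ha : a < g.length := hb a (by simp)
    have := ih (g.set a (v a (g.getD a []))) (by simp_all) (by simp; intro j hj; exact hb j (by simp [hj])) i (by simpa using hi)
    rw [this]
    by_cases hia : i = a
    · subst hia
      have hnt : i ∉ t := by simp at hnd; exact hnd.1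
      rw [if_neg hnt, if_pos (List.mem_cons_self)]
      exact pv_getD_set_self _ _ _ _ ha
    · rw [pv_getD_set_ne _ _ _ _ _ hia]
      by_cases hit : i ∈ t <;> simp [hit, hia]

-- a fold that rewrites each column index once
lemma pv_rect_updCol (g : List (List String)) (j : Nat) (c : List String) (rows cols : Nat)
    (h : pvRect g rows cols) : pvRect (pvUpdCol g j c) rows cols := by
  constructor
  · simp [pvUpdCol, h.1]
  · intro r hr
    simp only [pvUpdCol, List.mem_map, List.mem_range] at hr
    obtain ⟨i, hi, rfl⟩ := hr
    have : g.getD i [] ∈ g := by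
      rw [List.getD_eq_getElem _ _ hi]; exact List.getElem_mem _
    rw [List.length_set]
    exact h.2 _ this

lemma pv_colAt_updCol_ne (g : List (List String)) (j k : Nat) (c : List String) (hkj : k ≠ j) :
    pvColAt (pvUpdCol g j c) k = pvColAt g k := by
  apply List.ext_getElem (by simp [pvColAt, pvUpdCol])
  intro i h1 h2
  have hig : i < g.length := by simpa [pvColAt, pvUpdCol] using h1
  simp only [pvColAt, pvUpdCol, List.getElem_map, List.getElem_range]
  rw [pv_getD_set_ne _ _ _ _ _ hkj]
  congr 1
  rw [List.getD_eq_getElem _ _ hig]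

lemma pv_colAt_updCol_self (g : List (List String)) (j : Nat) (c : List String)
    (rows cols : Nat) (h : pvRect g rows cols) (hj : j < cols) (hc : c.length = g.length) :
    pvColAt (pvUpdCol g j c) j = c := by
  apply List.ext_getElem (by simp [pvColAt, pvUpdCol, hc])
  intro i h1 h2
  have hig : i < g.length := by simpa [pvColAt, pvUpdCol] using h1
  have hrow : (g.getD i []).length = cols := by
    have : g.getD i [] ∈ g := by
      rw [List.getD_eq_getElem _ _ hig]; exact List.getElem_mem _
    exact h.2 _ this
  simp only [pvColAt, pvUpdCol, List.getElem_map, List.getElem_range]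
  rw [pv_getD_set_self _ _ _ _ (by omega), List.getD_eq_getElem _ _ (by omega)]

lemma pv_eq_of_colAt (g h : List (List String)) (rows cols : Nat)
    (hg : pvRect g rows cols) (hh : pvRect h rows cols)
    (he : ∀ k, k < cols → pvColAt g k = pvColAt h k) : g = h := by
  apply List.ext_getElem (by rw [hg.1, hh.1])
  intro i h1 h2
  apply List.ext_getElem (by rw [hg.2 _ (List.getElem_mem _), hh.2 _ (List.getElem_mem _)])
  intro j hj1 hj2
  have hjc : j < cols := by rw [hg.2 _ (List.getElem_mem _)] at hj1; exact hj1
  have h3 := congrArg (fun l => l.getD i "") (he j hjc)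
  simp only at h3
  rw [pv_getD_colAt, pv_getD_colAt] at h3
  rw [List.getD_eq_getElem _ _ h1, List.getD_eq_getElem _ _ h2] at h3
  rwa [List.getD_eq_getElem _ _ hj1, List.getD_eq_getElem _ _ hj2] at h3

lemma pv_foldl_updCol (rows cols : Nat) (w : Nat → List String → List String)
    (hw : ∀ j c, (w j c).length = c.length) (l : List Nat) :
    ∀ g : List (List String), pvRect g rows cols → l.Nodup → (∀ j ∈ l, j < cols) →
      pvRect (l.foldl (fun g j => pvUpdCol g j (w j (pvColAt g j))) g) rows cols ∧
      (∀ k, k < cols →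
        pvColAt (l.foldl (fun g j => pvUpdCol g j (w j (pvColAt g j))) g) k
          = if k ∈ l then w k (pvColAt g k) else pvColAt g k) := by
  induction l with
  | nil => intro g hg _ _; exact ⟨hg, by intro k _; simp⟩
  | cons a t ih =>
    intro g hg hnd hb
    rw [List.foldl_cons]
    have ha : a < cols := hb a (by simp)
    have hg1 : pvRect (pvUpdCol g a (w a (pvColAt g a))) rows cols := pv_rect_updCol _ _ _ _ _ hg
    have hthis := ih _ hg1 (by simp_all) (by intro j hj; exact hb j (by simp [hj]))
    refine ⟨hthis.1, ?_⟩
    intro k hk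
    rw [hthis.2 k hk]
    by_cases hka : k = a
    · subst hka
      have hnt : k ∉ t := by simp at hnd; exact hnd.1
      rw [if_neg hnt, if_pos (by simp)]
      exact pv_colAt_updCol_self _ _ _ rows cols hg hk (by rw [hw, pv_length_colAt, hg.1])
    · rw [pv_colAt_updCol_ne _ _ _ _ hka]
      by_cases hkt : k ∈ t <;> simp [hkt, hka]

lemma pv_updCol_colAt (g : List (List String)) (j : Nat) :
    pvUpdCol g j (pvColAt g j) = g := by
  apply List.ext_getElem (by simp [pvUpdCol])
  intro i h1 h2
  simp only [pvUpdCol, List.getElem_map, List.getElem_range]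
  rw [pv_getD_colAt, pv_set_getD_self, List.getD_eq_getElem _ _ h2]
lemma pv_row_len (q : List (List String)) (rows cols i : Nat) (h : pvRect q rows cols)
    (hi : i < rows) : (q.getD i []).length = cols := by
  have hm : q.getD i [] ∈ q := by
    rw [List.getD_eq_getElem _ _ (by rw [h.1]; exact hi)]
    exact List.getElem_mem _
  exact h.2 _ hm

lemma pv_rect_dots (rows cols : Nat) : pvRect (pvDots rows cols) rows cols := by
  constructor
  · simp [pvDots]
  · intro r hr
    simp only [pvDots, List.mem_map, List.mem_range] at hr
    obtain ⟨i, _, rfl⟩ := hr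
    simp

lemma pv_dots_getD (rows cols i : Nat) (hi : i < rows) :
    (pvDots rows cols).getD i [] = List.replicate cols "." := by
  unfold pvDots
  rw [pv_getD_map_range _ _ _ _ hi, List.map_const', List.length_range]

lemma pv_colAt_dots (rows cols k : Nat) :
    pvColAt (pvDots rows cols) k = List.replicate rows (if k < cols then "." else "") := by
  apply List.ext_getElem (by simp [pvColAt, pvDots])
  intro i h1 h2
  have hi : i < rows := by simpa [pvColAt, pvDots] using h1
  simp only [pvColAt, List.getElem_map, List.getElem_replicate]
  rw [show (pvDots rows cols)[i]'(by simpa [pvColAt] using h1) = (pvDots rows cols).getD i []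
      from by rw [List.getD_eq_getElem], pv_dots_getD _ _ _ hi]
  by_cases hk : k < cols
  · simp [hk, List.getD, List.getElem?_replicate]
  · rw [if_neg hk, pv_getD_of_le _ _ _ (by simpa using by omega)]

lemma pv_idxF_wRow_len (suf : List String) :
    ∀ (j0 : Nat) (r : List String) (pos : Nat),
      ((pvIdxF wRow j0 suf (r, pos)).1).length = r.length := by
  induction suf with
  | nil => intro j0 r pos; rfl
  | cons c cs ih =>
    intro j0 r pos
    rw [pvIdxF]
    by_cases hc : c = "#"
    · rw [show wRow (r, pos) j0 c = (r.set j0 "#", max pos (j0 + 1)) from by simp [wRow, hc]]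
      rw [ih]; simp
    · by_cases ho : c = "O"
      · rw [show wRow (r, pos) j0 c = (r.set pos "O", pos + 1) from by simp [wRow, hc, ho]]
        rw [ih]; simp
      · rw [show wRow (r, pos) j0 c = (r, pos) from by simp [wRow, hc, ho]]
        exact ih _ _ _

lemma pv_idxD_eRow_len (suf : List String) :
    ∀ (j0 : Int) (r : List String) (pos : Int),
      ((pvIdxD eRow j0 suf (r, pos)).1).length = r.length := by
  induction suf with
  | nil => intro j0 r pos; rfl
  | cons c cs ih =>
    intro j0 r pos
    rw [pvIdxD]
    by_cases hc : c = "#"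
    · rw [show eRow (r, pos) j0 c = (r.set j0.toNat "#", min pos (j0 - 1)) from by simp [eRow, hc]]
      rw [ih]; simp
    · by_cases ho : c = "O"
      · rw [show eRow (r, pos) j0 c = (r.set pos.toNat "O", pos - 1) from by simp [eRow, hc, ho]]
        rw [ih]; simp
      · rw [show eRow (r, pos) j0 c = (r, pos) from by simp [eRow, hc, ho]]
        exact ih _ _ _

-- ===== tilt characterizations =====

lemma pv_tiltWest_eq (q : List (List String)) (rows cols : Nat)
    (h : pvRect q rows cols) (hr : 0 < rows) : tiltWest q = q.map rollB := by
  have hq0 : (q.getD 0 []).length = cols := pv_row_len q rows cols 0 h hr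
  show (List.range q.length).foldl _ (pvDots q.length (q.getD 0 []).length) = _
  rw [h.1, hq0]
  have hbody : ∀ (np : List (List String)) (i : Nat), i ∈ List.range rows →
      ((List.range cols).foldl (fun s j => wStep i s j ((q.getD i []).getD j "")) (np, 0)).1
        = np.set i ((pvIdxF wRow 0 ((q.getD i []).take cols) (np.getD i [], 0)).1) := by
    intro np i hi
    rw [List.range_eq_range',
      pv_bridge_fwd (wStep i) (q.getD i []) cols 0 (np, 0)
        (by rw [pv_row_len q rows cols i h (by simpa using hi)]; omega),
      List.drop_zero]
    conv_lhs => rw [show np = np.set i (np.getD i []) from (pv_set_getD_self [] np i).symm]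
    rw [pv_sim_w]
  rw [PySem.List.foldl_congr_mem _ _ _ _ hbody]
  beta_reduce
  have hlen := pv_foldl_set_length (List.range rows)
    (fun i buf => (pvIdxF wRow 0 ((q.getD i []).take cols) (buf, 0)).1) (pvDots rows cols)
  beta_reduce at hlen
  apply List.ext_getElem
  · rw [hlen]; simp [pvDots, h.1]
  intro i h1 h2
  have hir : i < rows := by
    rw [hlen] at h1; simpa [pvDots] using h1
  have hget := pv_foldl_set_getD (List.range rows)
    (fun i buf => (pvIdxF wRow 0 ((q.getD i []).take cols) (buf, 0)).1)
    (pvDots rows cols) (List.nodup_range) (by simp [pvDots]) i (by simp [pvDots, hir])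
  rw [if_pos (by simpa using hir)] at hget
  have hrow : (q.getD i []).length = cols := pv_row_len q rows cols i h hir
  have htake : (q.getD i []).take cols = q.getD i [] := by
    rw [← hrow, List.take_length]
  beta_reduce at hget
  rw [pv_dots_getD _ _ _ hir, htake] at hget
  have hfull := pv_wRow_full (q.getD i [])
  have hbuf : List.replicate cols "." = List.replicate (q.getD i []).length "." := by rw [hrow]
  rw [hbuf, hfull] at hget
  rw [← List.getD_eq_getElem _ [] h1, hget]
  rw [List.getElem_map, ← List.getD_eq_getElem q [] (by rw [h.1]; omega)]

lemma pv_tiltEast_eq (q : List (List String)) (rows cols : Nat)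
    (h : pvRect q rows cols) (hr : 0 < rows) : tiltEast q = q.map revRollB := by
  have hq0 : (q.getD 0 []).length = cols := pv_row_len q rows cols 0 h hr
  show (List.range q.length).foldl _ (pvDots q.length (q.getD 0 []).length) = _
  rw [h.1, hq0]
  have hbody : ∀ (np : List (List String)) (i : Nat), i ∈ List.range rows →
      (((List.range cols).reverse).foldl
          (fun s j => eStep i s (Int.ofNat j) ((q.getD i []).getD j "")) (np, (cols : Int) - 1)).1
        = np.set i ((pvIdxD eRow ((cols : Int) - 1) (((q.getD i []).take cols).reverse)
            (np.getD i [], (cols : Int) - 1)).1) := by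
    intro np i hi
    rw [pv_bridge_rev (eStep i) (q.getD i []) cols (np, (cols : Int) - 1)
        (by rw [pv_row_len q rows cols i h (by simpa using hi)])]
    conv_lhs => rw [show np = np.set i (np.getD i []) from (pv_set_getD_self [] np i).symm]
    rw [pv_sim_e]
  rw [PySem.List.foldl_congr_mem _ _ _ _ hbody]
  beta_reduce
  have hlen := pv_foldl_set_length (List.range rows)
    (fun i buf => (pvIdxD eRow ((cols : Int) - 1) (((q.getD i []).take cols).reverse)
      (buf, (cols : Int) - 1)).1) (pvDots rows cols)
  beta_reduce at hlen
  apply List.ext_getElem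
  · rw [hlen]; simp [pvDots, h.1]
  intro i h1 h2
  have hir : i < rows := by
    rw [hlen] at h1; simpa [pvDots] using h1
  have hget := pv_foldl_set_getD (List.range rows)
    (fun i buf => (pvIdxD eRow ((cols : Int) - 1) (((q.getD i []).take cols).reverse)
      (buf, (cols : Int) - 1)).1)
    (pvDots rows cols) (List.nodup_range) (by simp [pvDots]) i (by simp [pvDots, hir])
  rw [if_pos (by simpa using hir)] at hget
  have hrow : (q.getD i []).length = cols := pv_row_len q rows cols i h hir
  have htake : (q.getD i []).take cols = q.getD i [] := by
    rw [← hrow, List.take_length]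
  beta_reduce at hget
  rw [pv_dots_getD _ _ _ hir, htake] at hget
  have hfull := pv_eRow_full (q.getD i [])
  rw [hrow] at hfull
  rw [hfull] at hget
  rw [← List.getD_eq_getElem _ [] h1, hget]
  rw [List.getElem_map, ← List.getD_eq_getElem q [] (by rw [h.1]; omega)]
lemma pv_tiltNorth_eq (p : List (List String)) (rows cols : Nat)
    (hlen : p.length = rows) (hc0 : (p.getD 0 []).length = cols)
    (hGood : ∀ i, i < rows → cols ≤ (p.getD i []).length) (hr : 0 < rows) :
    pvRect (tiltNorth p) rows cols ∧
    ∀ k, k < cols → pvColAt (tiltNorth p) k = rollB (pvColAt p k) := by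
  have hcolF : ∀ j, (pvColAt p j).length = rows := by
    intro j; rw [pv_length_colAt, hlen]
  have hbody : ∀ (np : List (List String)), ∀ j ∈ List.range cols,
      ((List.range rows).foldl (fun s i => nStep j s i ((p.getD i []).getD j "")) (np, 0)).1
        = pvUpdCol np j ((pvIdxF wRow 0 (pvColAt p j) (pvColAt np j, 0)).1) := by
    intro np j hj
    have hfeq : (fun (s : List (List String) × Nat) i => nStep j s i ((p.getD i []).getD j ""))
        = (fun s i => nStep j s i ((pvColAt p j).getD i "")) := by
      funext s i; rw [pv_getD_colAt]
    rw [hfeq, List.range_eq_range',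
      pv_bridge_fwd (nStep j) (pvColAt p j) rows 0 (np, 0) (by rw [hcolF]; omega),
      List.drop_zero, show (pvColAt p j).take rows = pvColAt p j from by
        rw [← hcolF j, List.take_length]]
    conv_lhs => rw [show np = pvUpdCol np j (pvColAt np j) from (pv_updCol_colAt np j).symm]
    rw [pv_sim_n j (pvColAt p j) 0 np (pvColAt np j) 0 (by rw [pv_length_colAt])]
  have hshow : tiltNorth p
      = (List.range cols).foldl
          (fun np j => pvUpdCol np j ((pvIdxF wRow 0 (pvColAt p j) (pvColAt np j, 0)).1))
          (pvDots rows cols) := by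
    show (List.range (p.getD 0 []).length).foldl _ (pvDots p.length (p.getD 0 []).length) = _
    rw [hlen, hc0, PySem.List.foldl_congr_mem _ _ _ _ hbody]
  have hw : ∀ j c, ((fun j buf => (pvIdxF wRow 0 (pvColAt p j) (buf, 0)).1) j c).length
      = c.length := by
    intro j c; exact pv_idxF_wRow_len _ _ _ _
  have hfold := pv_foldl_updCol rows cols
    (fun j buf => (pvIdxF wRow 0 (pvColAt p j) (buf, 0)).1) hw (List.range cols)
    (pvDots rows cols) (pv_rect_dots rows cols) (List.nodup_range) (by simp)
  beta_reduce at hfold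
  rw [hshow]
  refine ⟨hfold.1, ?_⟩
  intro k hk
  rw [hfold.2 k hk, if_pos (by simpa using hk)]
  rw [pv_colAt_dots, if_pos hk]
  rw [show List.replicate rows "." = List.replicate (pvColAt p k).length "." from by rw [hcolF]]
  rw [pv_wRow_full]

lemma pv_tiltSouth_eq (p : List (List String)) (rows cols : Nat)
    (hlen : p.length = rows) (hc0 : (p.getD 0 []).length = cols)
    (hGood : ∀ i, i < rows → cols ≤ (p.getD i []).length) (hr : 0 < rows) :
    pvRect (tiltSouth p) rows cols ∧
    ∀ k, k < cols → pvColAt (tiltSouth p) k = revRollB (pvColAt p k) := by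
  have hcolF : ∀ j, (pvColAt p j).length = rows := by
    intro j; rw [pv_length_colAt, hlen]
  have hbody : ∀ (np : List (List String)), ∀ j ∈ List.range cols,
      (((List.range rows).reverse).foldl
          (fun s i => sStep j s (Int.ofNat i) ((p.getD i []).getD j "")) (np, (rows : Int) - 1)).1
        = pvUpdCol np j ((pvIdxD eRow ((rows : Int) - 1) ((pvColAt p j).reverse)
            (pvColAt np j, (rows : Int) - 1)).1) := by
    intro np j hj
    have hfeq : (fun (s : List (List String) × Int) i =>
          sStep j s (Int.ofNat i) ((p.getD i []).getD j ""))
        = (fun s i => sStep j s (Int.ofNat i) ((pvColAt p j).getD i "")) := by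
      funext s i; rw [pv_getD_colAt]
    rw [hfeq, pv_bridge_rev (sStep j) (pvColAt p j) rows (np, (rows : Int) - 1) (by rw [hcolF])]
    rw [show (pvColAt p j).take rows = pvColAt p j from by rw [← hcolF j, List.take_length]]
    conv_lhs => rw [show np = pvUpdCol np j (pvColAt np j) from (pv_updCol_colAt np j).symm]
    rw [pv_sim_s j ((pvColAt p j).reverse) ((rows : Int) - 1) np (pvColAt np j)
      ((rows : Int) - 1) (by rw [pv_length_colAt])]
  have hshow : tiltSouth p
      = (List.range cols).foldl
          (fun np j => pvUpdCol np j ((pvIdxD eRow ((rows : Int) - 1) ((pvColAt p j).reverse)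
            (pvColAt np j, (rows : Int) - 1)).1))
          (pvDots rows cols) := by
    show (List.range (p.getD 0 []).length).foldl _ (pvDots p.length (p.getD 0 []).length) = _
    rw [hlen, hc0, PySem.List.foldl_congr_mem _ _ _ _ hbody]
  have hw : ∀ j c, ((fun j buf => (pvIdxD eRow ((rows : Int) - 1) ((pvColAt p j).reverse)
      (buf, (rows : Int) - 1)).1) j c).length = c.length := by
    intro j c; exact pv_idxD_eRow_len _ _ _ _
  have hfold := pv_foldl_updCol rows cols
    (fun j buf => (pvIdxD eRow ((rows : Int) - 1) ((pvColAt p j).reverse)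
      (buf, (rows : Int) - 1)).1) hw (List.range cols)
    (pvDots rows cols) (pv_rect_dots rows cols) (List.nodup_range) (by simp)
  beta_reduce at hfold
  rw [hshow]
  refine ⟨hfold.1, ?_⟩
  intro k hk
  rw [hfold.2 k hk, if_pos (by simpa using hk)]
  rw [pv_colAt_dots, if_pos hk]
  have hfull := pv_eRow_full (pvColAt p k)
  rw [hcolF] at hfull
  rw [hfull]
lemma pv_ext_getD (l1 l2 : List String) (hl : l1.length = l2.length)
    (h : ∀ i, i < l1.length → l1.getD i "" = l2.getD i "") : l1 = l2 := by
  apply List.ext_getElem hl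
  intro i h1 h2
  have := h i h1
  rwa [List.getD_eq_getElem _ _ h1, List.getD_eq_getElem _ _ h2] at this

lemma pv_minWidth_eq (cols : Nat) : ∀ g : List (List String), g ≠ [] →
    (∀ r ∈ g, r.length = cols) → minWidth g = cols := by
  intro g
  induction g with
  | nil => intro h; exact absurd rfl h
  | cons r rs ih =>
    intro _ hall
    cases rs with
    | nil => exact hall r (by simp)
    | cons b t =>
      show min r.length (minWidth (b :: t)) = cols
      rw [hall r (by simp), ih (by simp) (by intro x hx; exact hall x (by simp [hx]))]
      simp

lemma pv_colsB_rect (g : List (List String)) (rows cols : Nat)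
    (h : pvRect g rows cols) (hr : 0 < rows) :
    colsB g = (List.range cols).map (fun j => pvColAt g j) := by
  cases g with
  | nil =>
    exfalso
    have := h.1
    simp at this
    omega
  | cons r rs =>
    show (List.range (minWidth (r :: rs))).map _ = _
    rw [pv_minWidth_eq cols (r :: rs) (by simp) h.2]
    rfl

lemma pv_double_colsB (g : List (List String)) (rows cols : Nat)
    (f : List String → List String) (hf : ∀ c, (f c).length = c.length)
    (h : pvRect g rows cols) (hr : 0 < rows) (hc : 0 < cols) :
    pvRect (colsB ((colsB g).map f)) rows cols ∧
    ∀ k, k < cols → pvColAt (colsB ((colsB g).map f)) k = f (pvColAt g k) := by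
  rw [pv_colsB_rect g rows cols h hr, List.map_map]
  rw [show f ∘ (fun j => pvColAt g j) = fun j => f (pvColAt g j) from rfl]
  have hrectM : pvRect ((List.range cols).map (fun j => f (pvColAt g j))) cols rows := by
    constructor
    · simp
    · intro r hrr
      simp only [List.mem_map, List.mem_range] at hrr
      obtain ⟨j, _, rfl⟩ := hrr
      rw [hf, pv_length_colAt, h.1]
  rw [pv_colsB_rect _ cols rows hrectM hc]
  constructor
  · constructor
    · simp
    · intro r hrr
      simp only [List.mem_map, List.mem_range] at hrr
      obtain ⟨i, _, rfl⟩ := hrr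
      simp [pv_length_colAt]
  · intro k hk
    apply pv_ext_getD _ _ (by simp [pvColAt, hf, pv_length_colAt, h.1])
    intro i hi'
    have hi : i < rows := by simpa [pvColAt] using hi'
    rw [pv_getD_colAt]
    rw [show ((List.range rows).map (fun i =>
          pvColAt ((List.range cols).map (fun j => f (pvColAt g j))) i)).getD i []
        = pvColAt ((List.range cols).map (fun j => f (pvColAt g j))) i from
      pv_getD_map_range _ _ _ _ hi]
    rw [pv_getD_colAt]
    rw [show ((List.range cols).map (fun j => f (pvColAt g j))).getD k [] = f (pvColAt g k) from
      pv_getD_map_range _ _ _ _ hk]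

lemma pv_getD_take (row : List String) (cols k : Nat) (hk : k < cols) :
    (row.take cols).getD k "" = row.getD k "" := by
  simp [List.getD, List.getElem?_take, hk]

lemma pv_colAt_crop (g : List (List String)) (cols k : Nat) (hk : k < cols) :
    pvColAt (g.map (fun row => row.take cols)) k = pvColAt g k := by
  unfold pvColAt
  rw [List.map_map]
  apply List.ext_getElem (by simp)
  intro i h1 h2
  simp only [List.getElem_map, Function.comp]
  exact pv_getD_take _ _ _ hk

lemma pv_rect_map (g : List (List String)) (rows cols : Nat)
    (f : List String → List String) (hf : ∀ c, (f c).length = c.length)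
    (h : pvRect g rows cols) : pvRect (g.map f) rows cols := by
  constructor
  · simp [h.1]
  · intro r hrr
    simp only [List.mem_map] at hrr
    obtain ⟨x, hx, rfl⟩ := hrr
    rw [hf]; exact h.2 _ hx

lemma pv_spin_eq (p : List (List String)) (rows cols : Nat)
    (hlen : p.length = rows) (hc0 : (p.getD 0 []).length = cols)
    (hGood : ∀ row ∈ p, cols ≤ row.length) (hr : 0 < rows) (hc : 0 < cols) :
    tiltEast (tiltSouth (tiltWest (tiltNorth p))) = spinB p ∧ pvRect (spinB p) rows cols := by
  have hne : p ≠ [] := by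
    intro hcon; rw [hcon] at hlen; simp at hlen; omega
  have hGood' : ∀ i, i < rows → cols ≤ (p.getD i []).length := by
    intro i hi
    have hm : p.getD i [] ∈ p := by
      rw [List.getD_eq_getElem _ _ (by omega : i < p.length)]
      exact List.getElem_mem _
    exact hGood _ hm
  have hif : (if p = [] then 0 else (p.headD []).length) = cols := by
    rw [if_neg hne]
    cases p with
    | nil => exact absurd rfl hne
    | cons a t => simpa using hc0
  have hg1 : pvRect (p.map (fun row => row.take cols)) rows cols := by
    constructor
    · simp [hlen]
    · intro r hrr
      simp only [List.mem_map] at hrr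
      obtain ⟨x, hx, rfl⟩ := hrr
      simp [List.length_take, Nat.min_eq_left (hGood x hx)]
  have hN := pv_tiltNorth_eq p rows cols hlen hc0 hGood' hr
  have hB2 := pv_double_colsB (p.map (fun row => row.take cols)) rows cols rollB
    pv_rollB_length hg1 hr hc
  have hNB : tiltNorth p = colsB ((colsB (p.map (fun row => row.take cols))).map rollB) :=
    pv_eq_of_colAt _ _ rows cols hN.1 hB2.1
      (by intro k hk; rw [hN.2 k hk, hB2.2 k hk, pv_colAt_crop _ _ _ hk])
  have hW : tiltWest (tiltNorth p) = (tiltNorth p).map rollB :=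
    pv_tiltWest_eq _ rows cols hN.1 hr
  have hrectW : pvRect ((tiltNorth p).map rollB) rows cols :=
    pv_rect_map _ _ _ _ pv_rollB_length hN.1
  have hc0W : (((tiltNorth p).map rollB).getD 0 []).length = cols :=
    pv_row_len _ rows cols 0 hrectW hr
  have hGoodW : ∀ i, i < rows → cols ≤ (((tiltNorth p).map rollB).getD i []).length := by
    intro i hi
    rw [pv_row_len _ rows cols i hrectW hi]
  have hS := pv_tiltSouth_eq ((tiltNorth p).map rollB) rows cols hrectW.1 hc0W hGoodW hr
  have hB4 := pv_double_colsB ((tiltNorth p).map rollB) rows cols revRollB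
    pv_revRollB_length hrectW hr hc
  have hSB : tiltSouth ((tiltNorth p).map rollB)
      = colsB ((colsB ((tiltNorth p).map rollB)).map revRollB) :=
    pv_eq_of_colAt _ _ rows cols hS.1 hB4.1
      (by intro k hk; rw [hS.2 k hk, hB4.2 k hk])
  have hE : tiltEast (tiltSouth ((tiltNorth p).map rollB))
      = (tiltSouth ((tiltNorth p).map rollB)).map revRollB :=
    pv_tiltEast_eq _ rows cols hS.1 hr
  have h1 : tiltEast (tiltSouth (tiltWest (tiltNorth p))) = spinB p := by
    rw [hW, hE, hSB, hNB]
    show _ = spinB p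
    simp only [spinB]
    rw [hif]
  have h2 : tiltEast (tiltSouth (tiltWest (tiltNorth p)))
      = (colsB ((colsB ((tiltNorth p).map rollB)).map revRollB)).map revRollB := by
    rw [hW, hE, hSB]
  exact ⟨h1, by
    rw [← h1, h2]
    exact pv_rect_map _ _ _ _ pv_revRollB_length hB4.1⟩
lemma pv_foldl_id {α β : Type} (l : List β) (init : α) :
    l.foldl (fun a _ => a) init = init := by
  induction l generalizing init with
  | nil => rfl
  | cons x t ih => exact ih init

lemma pv_calcLoad_empty_rows (g : List (List String)) (h : ∀ r ∈ g, r = ([] : List String)) :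
    calcLoad g = 0 := by
  show (List.range g.length).foldl _ 0 = 0
  rw [PySem.List.foldl_congr_mem (List.range g.length) _ (fun (acc : Int) _ => acc) 0 ?_]
  · exact pv_foldl_id _ _
  · intro acc i hi
    have hig : i < g.length := by simpa using hi
    have hrow : g.getD i [] = [] := by
      apply h
      rw [List.getD_eq_getElem _ _ hig]
      exact List.getElem_mem _
    rw [hrow]
    simp

lemma pv_dots0_rows (rows : Nat) : ∀ r ∈ pvDots rows 0, r = ([] : List String) := by
  intro r hr
  simp only [pvDots, List.range_zero, List.map_nil, List.mem_map] at hr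
  obtain ⟨_, _, rfl⟩ := hr
  rfl

lemma pv_deg_north (p : List (List String)) (hc0 : (p.getD 0 []).length = 0) :
    tiltNorth p = pvDots p.length 0 := by
  show (List.range (p.getD 0 []).length).foldl _ (pvDots p.length (p.getD 0 []).length)
      = pvDots p.length 0
  rw [hc0]
  simp

lemma pv_dots_len (rows cols : Nat) : (pvDots rows cols).length = rows := by simp [pvDots]

lemma pv_deg_getD0 (rows : Nat) (hr : 0 < rows) : ((pvDots rows 0).getD 0 []).length = 0 := by
  rw [pv_dots_getD rows 0 0 hr]
  simp

lemma pv_deg_west (rows : Nat) (hr : 0 < rows) :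
    tiltWest (pvDots rows 0) = pvDots rows 0 := by
  show (List.range (pvDots rows 0).length).foldl _
      (pvDots (pvDots rows 0).length ((pvDots rows 0).getD 0 []).length) = pvDots rows 0
  rw [pv_deg_getD0 rows hr, pv_dots_len]
  simp only [List.range_zero, List.foldl_nil]
  exact pv_foldl_id _ _

lemma pv_deg_south (rows : Nat) (hr : 0 < rows) :
    tiltSouth (pvDots rows 0) = pvDots rows 0 := by
  show (List.range ((pvDots rows 0).getD 0 []).length).foldl _
      (pvDots (pvDots rows 0).length ((pvDots rows 0).getD 0 []).length) = pvDots rows 0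
  rw [pv_deg_getD0 rows hr, pv_dots_len]
  simp

lemma pv_deg_east (rows : Nat) (hr : 0 < rows) :
    tiltEast (pvDots rows 0) = pvDots rows 0 := by
  show (List.range (pvDots rows 0).length).foldl _
      (pvDots (pvDots rows 0).length ((pvDots rows 0).getD 0 []).length) = pvDots rows 0
  rw [pv_deg_getD0 rows hr, pv_dots_len]
  simp only [List.range_zero, List.reverse_nil, List.foldl_nil]
  exact pv_foldl_id _ _

lemma pv_deg_spinA (p : List (List String)) (hr : 0 < p.length)
    (hc0 : (p.getD 0 []).length = 0) :
    [tiltNorth, tiltWest, tiltSouth, tiltEast].foldl (fun q f => f q) p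
      = pvDots p.length 0 := by
  show tiltEast (tiltSouth (tiltWest (tiltNorth p))) = pvDots p.length 0
  rw [pv_deg_north p hc0, pv_deg_west _ hr, pv_deg_south _ hr, pv_deg_east _ hr]

lemma pv_minWidth_nil_head (rs : List (List String)) : minWidth ([] :: rs) = 0 := by
  cases rs <;> simp [minWidth]

lemma pv_deg_spinB (p : List (List String)) (h : p = [] ∨ (p.getD 0 []).length = 0) :
    spinB p = [] := by
  cases p with
  | nil => rfl
  | cons a t =>
    have ha : a.length = 0 := by
      rcases h with h | h
      · exact absurd h (by simp)
      · simpa using h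
    have ha' : a = [] := List.eq_nil_of_length_eq_zero ha
    subst ha'
    have hcols : (if ([] :: t : List (List String)) = [] then 0
        else (([] :: t : List (List String)).headD []).length) = 0 := by simp
    have e1 : colsB (([] :: t : List (List String)).map (fun row => row.take 0)) = [] := by
      show colsB ([] :: t.map (fun row => row.take 0)) = []
      show (List.range (minWidth ([] :: t.map (fun row => row.take 0)))).map _ = []
      rw [pv_minWidth_nil_head]
      simp
    simp only [spinB]
    rw [hcols, e1]
    rfl
lemma pv_replay_succ (n : Nat) : ∀ g : List (List String),
    replayB (n + 1) g = spinB (replayB n g) := by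
  induction n with
  | zero => intro g; rfl
  | succ m ih => intro g; rw [show replayB (m + 1 + 1) g = replayB (m + 1) (spinB g) from rfl,
      ih (spinB g)]; rfl

lemma pv_deg_runA (fuel : Nat) (p : List (List String)) (hr : 0 < p.length)
    (hc0 : (p.getD 0 []).length = 0) (cycles : Int) :
    runCyclesA (fuel + 1) 0 [] p cycles = 0 := by
  have hD : [tiltNorth, tiltWest, tiltSouth, tiltEast].foldl (fun q f => f q) p
      = pvDots p.length 0 := pv_deg_spinA p hr hc0
  have hload : calcLoad (pvDots p.length 0) = 0 :=
    pv_calcLoad_empty_rows _ (pv_dots0_rows _)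
  rw [runCyclesA, hD]
  rw [if_neg (List.not_mem_nil)]
  cases fuel with
  | zero => exact hload
  | succ f =>
    have hDspin : [tiltNorth, tiltWest, tiltSouth, tiltEast].foldl (fun q f => f q)
        (pvDots p.length 0) = pvDots p.length 0 := by
      have := pv_deg_spinA (pvDots p.length 0) (by rw [pv_dots_len]; omega)
        (pv_deg_getD0 _ hr)
      rwa [pv_dots_len] at this
    rw [runCyclesA, hDspin, if_pos (by simp)]
    have hm1 : ∀ x : Int, PySem.Int.mod x 1 = 0 := fun x => by
      rw [PySem.Int.mod_eq_emod_of_pos (by omega)]; exact Int.emod_one x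
    simp only [List.nil_append, PySem.List.index?_cons_self, Option.getD_some,
      List.length_cons, List.length_nil, Nat.cast_zero, Nat.cast_one, CharP.cast_eq_zero]
    norm_num [hm1, PySem.List.pyGetD_zero_cons, hload]

lemma pv_deg_runB (fuel : Nat) (cycles : Int) (p : List (List String)) (hp : spinB p = []) :
    runCyclesB (fuel + 1) cycles 0 PySem.Dict.empty p p = 0 := by
  rw [runCyclesB, hp]
  rw [show PySem.Dict.empty.get? ([] : List (List String)) = none from
    PySem.Dict.get?_empty _]
  cases fuel with
  | zero => rfl
  | succ f =>
    rw [runCyclesB]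
    rw [show spinB ([] : List (List String)) = [] from rfl]
    rw [PySem.Dict.get?_insert_self]
    show calcLoad (replayB (if PySem.Int.mod (cycles - (0 + 1) + 1) (0 + 1 + 1 - (0 + 1)) = 0
        then (0 : Int) + 1
        else 0 + 1 + PySem.Int.mod (cycles - (0 + 1) + 1) (0 + 1 + 1 - (0 + 1)) - 1).toNat p) = 0
    rw [show ((0 : Int) + 1 + 1 - (0 + 1) : Int) = 1 from by ring,
      show (cycles - (0 + 1) + 1 : Int) = cycles from by ring]
    rw [show PySem.Int.mod cycles 1 = 0 from by
      rw [PySem.Int.mod_eq_emod_of_pos (by omega)]; exact Int.emod_one _]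
    norm_num
    rw [pv_replay_succ 0 p]
    show calcLoad (spinB p) = 0
    rw [hp]
    rfl
lemma pv_main (fuel : Nat) :
    ∀ (n : Nat) (seen : PySem.Dict (List (List String)) Int)
      (states : List (List (List String))) (orig p : List (List String))
      (cycles : Int) (rows cols : Nat),
      0 < rows → 0 < cols →
      states = (List.range n).map (fun k => replayB (k + 1) orig) →
      p = replayB n orig →
      (∀ s, seen.get? s = (PySem.List.index? states s).map (fun k => (k : Int) + 1)) →
      p.length = rows → (p.getD 0 []).length = cols → (∀ row ∈ p, cols ≤ row.length) →
      runCyclesA fuel (n : Int) states p cycles = runCyclesB fuel cycles (n : Int) seen orig p := by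
  induction fuel with
  | zero => intros; rfl
  | succ fuel ih =>
    intro n seen states orig p cycles rows cols hrows hcols hstates hp hinv hplen hpc0 hpgood
    have hspin := pv_spin_eq p rows cols hplen hpc0 hpgood hrows hcols
    have hlen_states : states.length = n := by rw [hstates]; simp
    have hreplay : spinB p = replayB (n + 1) orig := by rw [pv_replay_succ, hp]
    rw [runCyclesA, runCyclesB]
    rw [show [tiltNorth, tiltWest, tiltSouth, tiltEast].foldl (fun q f => f q) p
        = spinB p from hspin.1]
    cases hget : seen.get? (spinB p) with
    | some first =>
      rw [Option.elim_some]
      have h1 := hinv (spinB p)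
      rw [hget] at h1
      cases hidx : PySem.List.index? states (spinB p) with
      | none => rw [hidx] at h1; simp at h1
      | some k =>
        rw [hidx] at h1
        simp at h1
        have hmem : spinB p ∈ states :=
          (PySem.List.index?_isSome_iff states (spinB p)).mp (by rw [hidx]; rfl)
        rw [if_pos hmem]
        obtain ⟨hklt, -, -⟩ := PySem.List.getElem_of_index?_eq_some hidx
        rw [hlen_states] at hklt
        simp only [Option.getD_some]
        subst h1
        rw [hlen_states]
        have hL : (0 : Int) < (n : Int) - (k : Int) := by omega
        have hrem : PySem.Int.mod (cycles - ((k : Int) + 1) + 1) (((n : Int) + 1) - ((k : Int) + 1))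
            = PySem.Int.mod (cycles - (n : Int)) ((n : Int) - (k : Int)) := by
          rw [show (((n : Int) + 1) - ((k : Int) + 1)) = (n : Int) - (k : Int) from by ring,
            show (cycles - ((k : Int) + 1) + 1) = cycles - (k : Int) from by ring]
          rw [PySem.Int.mod_eq_emod_of_pos hL, PySem.Int.mod_eq_emod_of_pos hL]
          rw [show (cycles - (n : Int)) = (cycles - (k : Int)) - ((n : Int) - (k : Int)) from by
            ring, Int.sub_emod_right]
        rw [hrem]
        have hsk : states.getD k [] = replayB (k + 1) orig := by
          rw [hstates]; exact pv_getD_map_range _ _ _ _ hklt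
        by_cases hr0 : PySem.Int.mod (cycles - (n : Int)) ((n : Int) - (k : Int)) = 0
        · rw [if_pos hr0, if_pos hr0, PySem.List.pyGetD_natCast, hsk,
            show ((k : Int) + 1).toNat = k + 1 from by omega]
        · rw [if_neg hr0, if_neg hr0]
          have hbounds : 0 ≤ PySem.Int.mod (cycles - (n : Int)) ((n : Int) - (k : Int)) ∧
              PySem.Int.mod (cycles - (n : Int)) ((n : Int) - (k : Int)) < (n : Int) - (k : Int) := by
            rw [PySem.Int.mod_eq_emod_of_pos hL]
            exact ⟨Int.emod_nonneg _ (by omega), Int.emod_lt_of_pos _ hL⟩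
          set r := PySem.Int.mod (cycles - (n : Int)) ((n : Int) - (k : Int)) with hrdef
          have hr1 : 1 ≤ r := by omega
          have hidxlt : (k : Int) + r - 1 < (n : Int) := by omega
          rw [PySem.List.pyGetD_eq_getElem states [] (by omega)
            (by rw [hlen_states]; exact_mod_cast hidxlt)]
          rw [← List.getD_eq_getElem states []]
          rw [hstates, pv_getD_map_range _ _ _ _ (by omega : ((k : Int) + r - 1).toNat < n)]
          rw [show ((k : Int) + 1 + r - 1).toNat = ((k : Int) + r - 1).toNat + 1 from by omega]
    | none =>
      rw [Option.elim_none]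
      have h1 := hinv (spinB p)
      rw [hget] at h1
      have hnomem : spinB p ∉ states := by
        rw [← PySem.List.index?_eq_none_iff states (spinB p)]
        cases hidx : PySem.List.index? states (spinB p) with
        | none => rfl
        | some k => rw [hidx] at h1; simp at h1
      rw [if_neg hnomem]
      have hrect' := hspin.2
      have hlen' : (spinB p).length = rows := hrect'.1
      have hc0' : ((spinB p).getD 0 []).length = cols := pv_row_len _ rows cols 0 hrect' hrows
      have hgood' : ∀ row ∈ spinB p, cols ≤ row.length := by
        intro row hrow; rw [hrect'.2 _ hrow]
      have hstates' : states ++ [spinB p]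
          = (List.range (n + 1)).map (fun k => replayB (k + 1) orig) := by
        rw [List.range_succ, List.map_append, ← hstates]
        simp [hreplay]
      have hinv' : ∀ s, (seen.insert (spinB p) ((n : Int) + 1)).get? s
          = (PySem.List.index? (states ++ [spinB p]) s).map (fun k => (k : Int) + 1) := by
        intro s
        rw [PySem.Dict.get?_insert]
        by_cases hsp : s = spinB p
        · subst hsp
          rw [if_pos rfl, PySem.List.index?_append_singleton_self states _ hnomem]
          simp [hlen_states]
        · rw [if_neg hsp]
          by_cases hmem2 : s ∈ states
          · rw [PySem.List.index?_append_of_mem _ hmem2, hinv s]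
          · rw [hinv s, (PySem.List.index?_eq_none_iff _ _).mpr hmem2,
              (PySem.List.index?_eq_none_iff _ _).mpr (by simp [hmem2, hsp])]
      have hrec := ih (n + 1) (seen.insert (spinB p) ((n : Int) + 1)) (states ++ [spinB p])
        orig (spinB p) cycles rows cols hrows hcols hstates' hreplay hinv' hlen' hc0' hgood'
      rw [show (((n + 1 : Nat)) : Int) = (n : Int) + 1 from by push_cast; ring] at hrec
      exact hrec
-- ===== VERDICT (by name: the statements are the Claim_ definitions above) =====
theorem run_cycles_spec : Claim_equal_run_cycles := by
  intro platform cycles _ hpre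
  unfold Spec_run_cycles run_cycles run_cycles_alt
  by_cases hc : 0 < cycles
  · obtain ⟨hne, hgood⟩ := hpre hc
    have hrows : 0 < platform.length := by
      cases platform with
      | nil => exact absurd rfl hne
      | cons a t => simp
    have hhead : platform.headD [] = platform.getD 0 [] := by
      cases platform with
      | nil => rfl
      | cons a t => rfl
    by_cases hcol : 0 < (platform.getD 0 []).length
    · have hm := pv_main cycles.toNat 0 PySem.Dict.empty [] platform platform cycles
        platform.length (platform.getD 0 []).length hrows hcol (by simp) rfl
        (fun s => by rw [PySem.Dict.get?_empty]; rfl) rfl rfl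
        (fun row hrow => by rw [← hhead]; exact hgood row hrow)
      simpa using hm
    · obtain ⟨f, hf⟩ : ∃ f, cycles.toNat = f + 1 := ⟨cycles.toNat - 1, by omega⟩
      rw [hf, pv_deg_runA f platform hrows (by omega) cycles,
        pv_deg_runB f cycles platform (pv_deg_spinB platform (Or.inr (by omega)))]
  · rw [Int.toNat_of_nonpos (by omega)]
    rfl
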